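-- pv_equiv track=rewrite | github.com/pypi-data/pypi-mirror-389 | packages/github-lib/github_lib-0.9.0-py3-none-any.whl/gitlib/parsers/patch/helpers.py | shift_range
-- ===== SOURCE A (Python) =====
-- from itertools import accumulate
--
-- def shift_range(orig_one_line: str, formatted: str, included_chars: set):
--     """
--     Shifts the character ranges in a formatted string based on excluded characters.
--
--     Args:
--         orig_one_line (str): Original line from which the formatting was done.
--         formatted (str): Formatted string.
--         included_chars (set): Set of characters to include.
--
--     Returns:
--         list: List of shifted character ranges in the formatted string.
--     """
--     # Split the formatted string into lines and count included characters in each line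
--     formatted_lines = formatted.splitlines()
--     formatted_char_count = [sum(1 for ch in line if ch in included_chars) for line in formatted_lines]
--
--     # Calculate cumulative sum of included characters for each line
--     formatted_range = list(accumulate(formatted_char_count))
--
--     # Process original string and shift ranges
--     for pos, ch in enumerate(orig_one_line):
--         if ch not in included_chars:
--             # Find indices where range >= pos
--             for idx, val in enumerate(formatted_range):
--                 if val >= pos:
--                     formatted_range[idx] += 1
--
--     return formatted_range
-- ===== SOURCE B (Python) =====
-- def shift_range(orig_one_line: str, formatted: str, included_chars: set):
--     """Same result as the original, by a single sweep: each excluded position in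
--     orig_one_line bumps a suffix of the (nondecreasing) cumulative array, so the
--     final value of an entry v is v plus the length of the longest prefix of the
--     thresholds (pos_i - i for the i-th excluded position) that is <= v; a single
--     two-pointer sweep computes all entries."""
--     included = included_chars if isinstance(included_chars, set) else set(included_chars)
--     rng = []
--     total = 0
--     for line in formatted.splitlines():
--         total += sum(ch in included for ch in line)
--         rng.append(total)
--     thresholds = []
--     k = 0
--     for pos, ch in enumerate(orig_one_line):
--         if ch not in included:
--             thresholds.append(pos - k)
--             k += 1
--     out = []
--     j = 0
--     for v in rng:
--         while j < len(thresholds) and thresholds[j] <= v: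
--             j += 1
--         out.append(v + j)
--     return out
-- ===== Notes on version B (the rewrite author's own statement) =====
-- stated objective: alternative
-- what changed: A's nested loop (for each excluded position of orig_one_line, re-scan the whole cumulative array and bump every entry currently >= pos) is replaced by a single two-pointer sweep: the cumulative array is nondecreasing and excluded positions are strictly increasing, so an entry v ends up as v plus the length of the longest prefix of the thresholds pos_i - i that is <= v.
import Mathlib
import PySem

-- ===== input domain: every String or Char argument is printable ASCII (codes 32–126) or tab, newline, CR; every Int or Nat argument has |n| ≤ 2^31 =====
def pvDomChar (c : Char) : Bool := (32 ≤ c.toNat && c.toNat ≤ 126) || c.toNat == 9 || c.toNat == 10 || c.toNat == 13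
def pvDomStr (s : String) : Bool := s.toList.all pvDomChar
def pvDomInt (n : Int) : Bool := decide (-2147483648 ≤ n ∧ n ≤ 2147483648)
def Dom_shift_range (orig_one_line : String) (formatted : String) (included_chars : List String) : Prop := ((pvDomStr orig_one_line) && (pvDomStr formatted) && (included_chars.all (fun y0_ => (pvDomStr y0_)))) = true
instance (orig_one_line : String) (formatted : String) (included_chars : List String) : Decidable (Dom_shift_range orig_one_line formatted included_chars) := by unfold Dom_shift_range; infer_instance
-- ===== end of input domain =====

-- B replaces A's nested loop ("for every excluded position, bump every cumulative entry that is
-- currently >= pos") by a single two-pointer sweep over the thresholds pos_i - i --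
-- one sweep over the array instead of one re-scan per excluded position.

-- ===== PORT A =====
-- `ch in included_chars` for a char ch and a set of strings: some element equals the 1-char string
def pvMemC (c : Char) (s : List String) : Bool := s.contains (String.ofList [c])

-- itertools.accumulate (running sums, no initial element)
def pvAccum : List Int → Int → List Int
  | [], _ => []
  | x :: xs, t => (t + x) :: pvAccum xs (t + x)

def shift_range (orig_one_line : String) (formatted : String) (included_chars : List String) : List Int :=
  let formatted_lines := PySem.Str.splitlines formatted
  let formatted_char_count := formatted_lines.map (fun line =>
    line.toList.foldl (fun acc ch => if pvMemC ch included_chars then acc + 1 else acc) (0 : Int))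
  let formatted_range := pvAccum formatted_char_count 0
  -- for pos, ch in enumerate(orig): if ch not in included: bump every entry >= pos (in place)
  (PySem.List.enumerate orig_one_line.toList 0).foldl
    (fun r pc =>
      if pvMemC pc.2 included_chars then r
      else r.map (fun val => if pc.1 ≤ val then val + 1 else val))
    formatted_range

-- ===== PORT B =====
-- while j < len(thresholds) and thresholds[j] <= v: j += 1   (j together with the remaining suffix)
def pvConsume (v : Int) : Nat → List Int → Nat × List Int
  | j, [] => (j, [])
  | j, t :: ts => if t ≤ v then pvConsume v (j + 1) ts else (j, t :: ts)

def shift_range_alt (orig_one_line : String) (formatted : String) (included_chars : List String) : List Int :=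
  -- rng: cumulative included-char counts per line, built in one pass
  let rng := ((PySem.Str.splitlines formatted).foldl
      (fun (st : Int × List Int) line =>
        let total := st.1 + ((line.toList.countP (fun ch => pvMemC ch included_chars)) : Int)
        (total, st.2 ++ [total])) ((0 : Int), ([] : List Int))).2
  -- thresholds: pos - k for the k-th excluded position pos of orig_one_line
  let ts := ((PySem.List.enumerate orig_one_line.toList 0).foldl
      (fun (st : Int × List Int) pc =>
        if pvMemC pc.2 included_chars then st
        else (st.1 + 1, st.2 ++ [pc.1 - st.1])) ((0 : Int), ([] : List Int))).2
  -- two-pointer sweep: each entry v becomes v + (number of leading thresholds <= v)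
  (rng.foldl (fun (st : Nat × List Int × List Int) v =>
      let jr := pvConsume v st.1 st.2.1
      (jr.1, jr.2, st.2.2 ++ [v + (jr.1 : Int)])) ((0 : Nat), ts, ([] : List Int))).2.2

-- ===== PRECONDITION & SPEC =====
def Spec_shift_range (orig_one_line : String) (formatted : String) (included_chars : List String) (out : List Int) : Prop := out = shift_range_alt orig_one_line formatted included_chars
instance (orig_one_line : String) (formatted : String) (included_chars : List String) (out : List Int) : Decidable (Spec_shift_range orig_one_line formatted included_chars out) := by unfold Spec_shift_range; infer_instance

-- ===== CLAIM (what is proved, stated in full; the proofs are below) =====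
def Claim_equal_shift_range : Prop := ∀ (orig_one_line : String) (formatted : String) (included_chars : List String), Dom_shift_range orig_one_line formatted included_chars → Spec_shift_range orig_one_line formatted included_chars (shift_range orig_one_line formatted included_chars)

-- ===== LEMMAS AND PROOFS =====

-- excluded positions of cs, starting at index k
def exclPos (inc : List String) : Int → List Char → List Int
  | _, [] => []
  | k, c :: cs => if pvMemC c inc then exclPos inc (k + 1) cs else k :: exclPos inc (k + 1) cs

-- thresholds: pos - j for excluded positions, j = number of earlier excluded chars
def thrOf (inc : List String) : Int → Int → List Char → List Int
  | _, _, [] => []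
  | j, pos, c :: cs =>
    if pvMemC c inc then thrOf inc j (pos + 1) cs
    else (pos - j) :: thrOf inc (j + 1) (pos + 1) cs

def cnt (v : Int) : List Int → Nat
  | [] => 0
  | t :: ts => if t ≤ v then 1 + cnt v ts else 0

def bump (v p : Int) : Int := if p ≤ v then v + 1 else v

theorem exclPos_ge (inc : List String) (cs : List Char) (k : Int) :
    ∀ x ∈ exclPos inc k cs, k ≤ x := by
  induction cs generalizing k with
  | nil => simp [exclPos]
  | cons c cs ih =>
    intro x hx
    by_cases hm : pvMemC c inc
    · simp only [exclPos, if_pos hm] at hx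
      have := ih (k + 1) x hx; omega
    · simp only [exclPos, if_neg hm, List.mem_cons] at hx
      rcases hx with rfl | hx
      · omega
      · have := ih (k + 1) x hx; omega

theorem foldl_bump_noop (P : List Int) (v : Int) (h : ∀ x ∈ P, v < x) :
    P.foldl bump v = v := by
  induction P with
  | nil => rfl
  | cons p ps ih =>
    have hp : v < p := h p (by simp)
    simp only [List.foldl_cons, bump, if_neg (by omega : ¬ p ≤ v)]
    exact ih (fun x hx => h x (by simp [hx]))

-- per-element correctness of the threshold view: running value v + j, j increments so far
theorem foldl_bump_cnt (inc : List String) (cs : List Char) :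
    ∀ (pos j v : Int), (exclPos inc pos cs).foldl bump (v + j) = v + j + (cnt v (thrOf inc j pos cs) : Int) := by
  induction cs with
  | nil => intro pos j v; simp [exclPos, thrOf, cnt]
  | cons c cs ih =>
    intro pos j v
    by_cases hm : pvMemC c inc
    · simp only [exclPos, thrOf, if_pos hm]; exact ih (pos + 1) j v
    · simp only [exclPos, thrOf, if_neg hm, List.foldl_cons, cnt]
      by_cases hle : pos - j ≤ v
      · have hb : bump (v + j) pos = v + (j + 1) := by simp only [bump, if_pos (by omega : pos ≤ v + j)]; ring
        rw [hb, ih (pos + 1) (j + 1) v, if_pos hle]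
        push_cast; ring
      · have hb : bump (v + j) pos = v + j := by simp only [bump, if_neg (by omega : ¬ pos ≤ v + j)]
        rw [hb, if_neg hle, foldl_bump_noop]
        · simp
        · intro x hx
          have := exclPos_ge inc cs (pos + 1) x hx
          omega

-- A's outer loop over enumerate = a bump-fold over the excluded positions, pushed inside the map
theorem A_fold_eq (inc : List String) (cs : List Char) :
    ∀ (k : Int) (r : List Int),
      (PySem.List.enumerate cs k).foldl
        (fun r pc =>
          if pvMemC pc.2 inc then r
          else r.map (fun val => if pc.1 ≤ val then val + 1 else val)) r
      = r.map (fun v => (exclPos inc k cs).foldl bump v) := by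
  induction cs with
  | nil => intro k r; simp [PySem.List.enumerate_nil, exclPos, List.foldl_nil]
  | cons c cs ih =>
    intro k r
    rw [PySem.List.enumerate_cons, List.foldl_cons]
    by_cases hm : pvMemC c inc
    · simp only [hm, if_pos]
      rw [ih (k + 1) r]
      simp [exclPos, hm]
    · simp only [hm, Bool.false_eq_true, if_false]
      rw [ih (k + 1)]
      rw [List.map_map]
      simp only [exclPos, if_neg hm, List.foldl_cons]
      rfl

-- B's threshold-building fold computes thrOf
theorem B_thr_eq (inc : List String) (cs : List Char) :
    ∀ (k j : Int) (out : List Int),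
      ((PySem.List.enumerate cs k).foldl
        (fun (st : Int × List Int) pc =>
          if pvMemC pc.2 inc then st
          else (st.1 + 1, st.2 ++ [pc.1 - st.1])) (j, out)).2
      = out ++ thrOf inc j k cs := by
  induction cs with
  | nil => intro k j out; simp [PySem.List.enumerate_nil, thrOf]
  | cons c cs ih =>
    intro k j out
    rw [PySem.List.enumerate_cons, List.foldl_cons]
    by_cases hm : pvMemC c inc
    · simp only [hm, if_pos]
      rw [ih]
      simp [thrOf, hm]
    · simp only [hm, Bool.false_eq_true, if_false]
      rw [ih (k + 1) (j + 1) (out ++ [k - j])]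
      simp [thrOf, hm]

-- A's per-line count (foldl with +1) = B's countP, both as Int
theorem count_fold_eq (inc : List String) (l : List Char) :
    ∀ (acc : Int),
      l.foldl (fun acc ch => if pvMemC ch inc then acc + 1 else acc) acc
      = acc + ((l.countP (fun ch => pvMemC ch inc)) : Int) := by
  induction l with
  | nil => intro acc; simp
  | cons c l ih =>
    intro acc
    by_cases hm : pvMemC c inc
    · rw [List.foldl_cons, if_pos hm, ih, List.countP_cons, if_pos (by simpa using hm)]
      push_cast; ring
    · rw [List.foldl_cons, if_neg hm, ih, List.countP_cons, if_neg (by simpa using hm)]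
      simp

-- B's cumulative fold builds pvAccum
theorem B_cum_eq (inc : List String) (lines : List String) :
    ∀ (t : Int) (out : List Int),
      (lines.foldl
        (fun (st : Int × List Int) line =>
          let total := st.1 + ((line.toList.countP (fun ch => pvMemC ch inc)) : Int)
          (total, st.2 ++ [total])) (t, out)).2
      = out ++ pvAccum (lines.map (fun line => ((line.toList.countP (fun ch => pvMemC ch inc)) : Int))) t := by
  induction lines with
  | nil => intro t out; simp [pvAccum]
  | cons l lines ih =>
    intro t out
    rw [List.foldl_cons]
    refine (ih (t + ((l.toList.countP (fun ch => pvMemC ch inc)) : Int))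
      (out ++ [t + ((l.toList.countP (fun ch => pvMemC ch inc)) : Int)])).trans ?_
    rw [List.map_cons, pvAccum, List.append_assoc]
    rfl

theorem pvAccum_ge (cs : List Int) (t : Int) (h : ∀ c ∈ cs, 0 ≤ c) :
    ∀ x ∈ pvAccum cs t, t ≤ x := by
  induction cs generalizing t with
  | nil => simp [pvAccum]
  | cons c cs ih =>
    intro x hx
    have hc : 0 ≤ c := h c (by simp)
    simp only [pvAccum, List.mem_cons] at hx
    rcases hx with rfl | hx
    · omega
    · have := ih (t + c) (fun d hd => h d (by simp [hd])) x hx; omega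

theorem pvAccum_pairwise (cs : List Int) (t : Int) (h : ∀ c ∈ cs, 0 ≤ c) :
    (pvAccum cs t).Pairwise (· ≤ ·) := by
  induction cs generalizing t with
  | nil => simp [pvAccum]
  | cons c cs ih =>
    simp only [pvAccum, List.pairwise_cons]
    refine ⟨fun x hx => pvAccum_ge cs (t + c) (fun d hd => h d (by simp [hd])) x hx,
      ih (t + c) (fun d hd => h d (by simp [hd]))⟩

theorem pvConsume_eq (v : Int) (ts : List Int) :
    ∀ (j : Nat), pvConsume v j ts = (j + (ts.takeWhile (fun x => decide (x ≤ v))).length, ts.dropWhile (fun x => decide (x ≤ v))) := by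
  induction ts with
  | nil => intro j; simp [pvConsume]
  | cons t ts ih =>
    intro j
    by_cases h : t ≤ v
    · rw [pvConsume, if_pos h, ih, List.takeWhile_cons_of_pos (by simpa using h),
        List.dropWhile_cons_of_pos (by simpa using h)]
      simp; omega
    · rw [pvConsume, if_neg h, List.takeWhile_cons_of_neg (by simpa using h),
        List.dropWhile_cons_of_neg (by simpa using h)]
      simp

theorem cnt_eq_takeWhile (v : Int) (ts : List Int) :
    cnt v ts = (ts.takeWhile (fun x => decide (x ≤ v))).length := by
  induction ts with
  | nil => rfl
  | cons t ts ih =>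
    by_cases h : t ≤ v
    · rw [cnt, if_pos h, ih, List.takeWhile_cons_of_pos (by simpa using h)]
      simp [Nat.add_comm]
    · rw [cnt, if_neg h, List.takeWhile_cons_of_neg (by simpa using h)]
      rfl

theorem cnt_append_all_le (v : Int) (ts1 ts2 : List Int) (h : ∀ t ∈ ts1, t ≤ v) :
    cnt v (ts1 ++ ts2) = ts1.length + cnt v ts2 := by
  induction ts1 with
  | nil => simp
  | cons t ts1 ih =>
    rw [List.cons_append, cnt, if_pos (h t (by simp)), ih (fun t ht => h t (by simp [ht]))]
    simp; omega

-- the two-pointer sweep computes v + cnt v ts for every entry of a nondecreasing rng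
theorem TP_eq (rng : List Int) :
    rng.Pairwise (· ≤ ·) →
    ∀ (ts1 ts2 out : List Int), (∀ t ∈ ts1, ∀ v ∈ rng, t ≤ v) →
      (rng.foldl (fun (st : Nat × List Int × List Int) v =>
          let jr := pvConsume v st.1 st.2.1
          (jr.1, jr.2, st.2.2 ++ [v + (jr.1 : Int)])) (ts1.length, ts2, out)).2.2
      = out ++ rng.map (fun v => v + (cnt v (ts1 ++ ts2) : Int)) := by
  induction rng with
  | nil => intro _ ts1 ts2 out _; simp
  | cons v rng ih =>
    intro hpw ts1 ts2 out hle
    rw [List.pairwise_cons] at hpw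
    have hts1 : ∀ t ∈ ts1, t ≤ v := fun t ht => hle t ht v (by simp)
    have hstep : pvConsume v ts1.length ts2
        = ((ts1 ++ ts2.takeWhile (fun x => decide (x ≤ v))).length,
           ts2.dropWhile (fun x => decide (x ≤ v))) := by
      rw [pvConsume_eq]; simp
    rw [List.foldl_cons]
    simp only [hstep]
    rw [ih hpw.2 (ts1 ++ ts2.takeWhile (fun x => decide (x ≤ v)))
        (ts2.dropWhile (fun x => decide (x ≤ v)))
        (out ++ [v + (((ts1 ++ ts2.takeWhile (fun x => decide (x ≤ v))).length : Nat) : Int)])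
        (by
          intro t ht v' hv'
          rcases List.mem_append.mp ht with ht | ht
          · exact hle t ht v' (by simp [hv'])
          · have h1 : t ≤ v := by simpa using List.mem_takeWhile_imp ht
            exact le_trans h1 (hpw.1 v' hv'))]
    simp only [List.append_assoc, List.takeWhile_append_dropWhile]
    rw [List.map_cons, cnt_append_all_le v ts1 ts2 hts1, cnt_eq_takeWhile]
    simp [List.length_append]

-- ===== VERDICT (by name: the statement is the Claim_ definition above) =====
theorem shift_range_spec : Claim_equal_shift_range := by
  intro orig fmt inc _
  unfold Spec_shift_range shift_range shift_range_alt
  simp only []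
  rw [B_cum_eq, B_thr_eq, List.nil_append, List.nil_append]
  have hcounts :
      (PySem.Str.splitlines fmt).map (fun line =>
        line.toList.foldl (fun acc ch => if pvMemC ch inc then acc + 1 else acc) (0 : Int))
      = (PySem.Str.splitlines fmt).map (fun line =>
        ((line.toList.countP (fun ch => pvMemC ch inc)) : Int)) := by
    apply List.map_congr_left
    intro l _
    rw [count_fold_eq]
    omega
  rw [hcounts]
  set counts := (PySem.Str.splitlines fmt).map (fun line =>
    ((line.toList.countP (fun ch => pvMemC ch inc)) : Int)) with hc
  have hnonneg : ∀ c ∈ counts, 0 ≤ c := by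
    intro c hcm
    rw [hc] at hcm
    rcases List.mem_map.mp hcm with ⟨l, _, rfl⟩
    positivity
  have htp := TP_eq (pvAccum counts 0) (pvAccum_pairwise counts 0 hnonneg) []
    (thrOf inc 0 0 orig.toList) [] (by simp)
  simp only [List.length_nil, List.nil_append] at htp
  rw [A_fold_eq, htp]
  apply List.map_congr_left
  intro v _
  have := foldl_bump_cnt inc orig.toList 0 0 v
  simpa using this
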